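-- pv_equiv track=rewrite | github.com/Sorahawk/burgl-discord-bot | python-scripts/object_extraction.py | compile_counter
-- ===== SOURCE A (Python) =====
-- from collections import Counter
--
-- def compile_counter(item_list, recipe_type=None):
-- 	counter = Counter()
-- 	value = None
--
-- 	for item in item_list:
-- 		if item.strip():
-- 			if recipe_type == 'Smoothie':
-- 				counter[item] = 1
-- 			elif value is None:
-- 				value = item
-- 			else:
-- 				counter[value] = int(item)
-- 				value = None
--
-- 	return counter
-- ===== SOURCE B (Python) =====
-- from collections import Counter
--
--
-- def _skip(items, k):
--     # advance k past blank entries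
--     while k < len(items) and not items[k].strip():
--         k += 1
--     return k
--
--
-- def compile_counter(item_list, recipe_type=None):
--     counter = Counter()
--     n = len(item_list)
--     k = _skip(item_list, 0)
--     while k < n:
--         if recipe_type == 'Smoothie':
--             counter[item_list[k]] = 1
--             k = _skip(item_list, k + 1)
--         else:
--             j = _skip(item_list, k + 1)
--             if j == n:
--                 break
--             counter[item_list[k]] = int(item_list[j])
--             k = _skip(item_list, j + 1)
--     return counter
-- ===== Notes on version B (the rewrite author's own statement) =====
-- stated objective: alternative
-- what changed: Replaces A's one-pass element loop with a toggle/pending-key state by an index-based token scanner: a _skip helper jumps over blank runs and the main loop consumes a whole name token (and, for non-Smoothie, scans ahead for its value token) per iteration, with no pending-value state variable.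
import Mathlib
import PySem

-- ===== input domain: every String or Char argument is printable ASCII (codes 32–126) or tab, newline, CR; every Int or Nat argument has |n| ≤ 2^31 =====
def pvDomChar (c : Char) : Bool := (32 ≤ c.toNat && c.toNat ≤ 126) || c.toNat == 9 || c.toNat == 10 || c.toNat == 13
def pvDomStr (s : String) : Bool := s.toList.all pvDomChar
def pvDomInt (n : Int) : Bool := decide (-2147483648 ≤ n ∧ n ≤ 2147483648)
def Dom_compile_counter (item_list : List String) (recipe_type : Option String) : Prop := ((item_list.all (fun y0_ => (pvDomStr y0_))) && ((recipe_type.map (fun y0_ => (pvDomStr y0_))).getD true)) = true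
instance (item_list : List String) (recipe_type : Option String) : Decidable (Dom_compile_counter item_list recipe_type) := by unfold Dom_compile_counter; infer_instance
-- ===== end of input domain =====

-- B replaces A's pending-value toggle loop by a blank-skipping token scanner (alternative, same cost).

-- ===== PORT A =====
-- literal port of A's loop body: state = (counter, pending value)
def pvLoopA (rt : Option String) (st : PySem.Dict String Int × Option String) (item : String) :
    PySem.Dict String Int × Option String :=
  if PySem.Str.strip item ≠ "" then
    if rt = some "Smoothie" then (st.1.insert item 1, st.2)
    else match st.2 with
      | none => (st.1, some item)
      | some v => (st.1.insert v ((PySem.Int.ofStr? item).getD 0), none)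
  else st

def compile_counter (item_list : List String) (recipe_type : Option String) : List (String × Int) :=
  (item_list.foldl (pvLoopA recipe_type) (PySem.Dict.empty, none)).1.items

-- ===== PORT B =====
-- _skip + read at the index = take the first non-blank token and the remaining suffix
def pvFirstTok : List String → Option (String × List String)
  | [] => none
  | x :: xs => if PySem.Str.strip x = "" then pvFirstTok xs else some (x, xs)

theorem pvFirstTok_lt : ∀ (l : List String) (x : String) (xs : List String),
    pvFirstTok l = some (x, xs) → xs.length < l.length := by
  intro l
  induction l with
  | nil => intro x xs h; simp [pvFirstTok] at h
  | cons a t ih =>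
    intro x xs h
    by_cases hb : PySem.Str.strip a = ""
    · simp [pvFirstTok, hb] at h
      exact Nat.lt_trans (ih x xs h) (Nat.lt_succ_self _)
    · simp [pvFirstTok, hb] at h
      simp [h.2]

-- main scanner loop: consume one name token (and, non-Smoothie, its value token) per step
def pvScan (sm : Bool) (d : PySem.Dict String Int) (l : List String) : PySem.Dict String Int :=
  match h : pvFirstTok l with
  | none => d
  | some (name, rest) =>
    if sm then pvScan sm (d.insert name 1) rest
    else match h2 : pvFirstTok rest with
      | none => d
      | some (v, rest2) => pvScan sm (d.insert name ((PySem.Int.ofStr? v).getD 0)) rest2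
termination_by l.length
decreasing_by
· exact pvFirstTok_lt l name rest h
· exact Nat.lt_trans (pvFirstTok_lt rest v rest2 h2) (pvFirstTok_lt l name rest h)

def compile_counter_alt (item_list : List String) (recipe_type : Option String) : List (String × Int) :=
  (pvScan (recipe_type = some "Smoothie") PySem.Dict.empty item_list).items

-- ===== PRECONDITION & SPEC =====
-- Pre_ excludes exactly the inputs on which Python A raises ValueError: a non-Smoothie call
-- where some odd-position element of the non-blank items is not int()-parseable.
def Pre_compile_counter (item_list : List String) (recipe_type : Option String) : Prop :=
  recipe_type = some "Smoothie" ∨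
    ∀ p ∈ (item_list.filter (fun i => PySem.Str.strip i ≠ "")).zipIdx,
      p.2 % 2 = 1 → (PySem.Int.ofStr? p.1).isSome = true
instance (item_list : List String) (recipe_type : Option String) : Decidable (Pre_compile_counter item_list recipe_type) := by unfold Pre_compile_counter; infer_instance
def pvWitness_compile_counter : List String × Option String := (["Pebblet", " 2 ", "", "Sprig", "3"], none)

def Spec_compile_counter (item_list : List String) (recipe_type : Option String) (out : List (String × Int)) : Prop := out = compile_counter_alt item_list recipe_type
instance (item_list : List String) (recipe_type : Option String) (out : List (String × Int)) : Decidable (Spec_compile_counter item_list recipe_type out) := by unfold Spec_compile_counter; infer_instance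

-- ===== CLAIM (what is proved, stated in full; the proofs are below) =====
def Claim_equal_compile_counter : Prop := ∀ (item_list : List String) (recipe_type : Option String), Dom_compile_counter item_list recipe_type → Pre_compile_counter item_list recipe_type → Spec_compile_counter item_list recipe_type (compile_counter item_list recipe_type)

-- ===== LEMMAS AND PROOFS =====

theorem pvFirstTok_nonblank : ∀ (l : List String) (x : String) (xs : List String),
    pvFirstTok l = some (x, xs) → PySem.Str.strip x ≠ "" := by
  intro l
  induction l with
  | nil => intro x xs h; simp [pvFirstTok] at h
  | cons a t ih =>
    intro x xs h
    by_cases hb : PySem.Str.strip a = ""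
    · simp [pvFirstTok, hb] at h
      exact ih x xs h
    · simp [pvFirstTok, hb] at h
      rw [← h.1]; exact hb

-- blanks are identity steps of A's loop, so A's fold only sees the token structure
theorem pvFoldSkip (rt : Option String) : ∀ (l : List String)
    (s : PySem.Dict String Int × Option String), pvFirstTok l = none →
    l.foldl (pvLoopA rt) s = s := by
  intro l
  induction l with
  | nil => intro s _; rfl
  | cons a t ih =>
    intro s h
    by_cases hb : PySem.Str.strip a = ""
    · simp [pvFirstTok, hb] at h
      simp [pvLoopA, hb, ih s h]
    · simp [pvFirstTok, hb] at h

theorem pvFoldTok (rt : Option String) : ∀ (l : List String) (x : String) (xs : List String)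
    (s : PySem.Dict String Int × Option String), pvFirstTok l = some (x, xs) →
    l.foldl (pvLoopA rt) s = xs.foldl (pvLoopA rt) (pvLoopA rt s x) := by
  intro l
  induction l with
  | nil => intro x xs s h; simp [pvFirstTok] at h
  | cons a t ih =>
    intro x xs s h
    by_cases hb : PySem.Str.strip a = ""
    · simp [pvFirstTok, hb] at h
      simp [pvLoopA, hb, ih x xs s h]
    · simp [pvFirstTok, hb] at h
      simp [h.1, h.2]

-- non-Smoothie: A's toggle fold from a clean state equals B's scanner
theorem pvMainNS (rt : Option String) (hrt : ¬ rt = some "Smoothie")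
    (l : List String) (d : PySem.Dict String Int) :
    (l.foldl (pvLoopA rt) (d, none)).1 = pvScan false d l := by
  match h : pvFirstTok l with
  | none =>
    rw [pvFoldSkip rt l _ h, pvScan, h]
  | some (x, xs) =>
    have hx : PySem.Str.strip x ≠ "" := pvFirstTok_nonblank l x xs h
    rw [pvFoldTok rt l x xs _ h]
    match h2 : pvFirstTok xs with
    | none =>
      rw [pvFoldSkip rt xs _ h2, pvScan, h]
      simp only [pvLoopA, if_pos hx, if_neg hrt, Bool.false_eq_true, if_false]
      split
      · rfl
      · rename_i v rest2 he
        rw [h2] at he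
        cases he
    | some (v, xs2) =>
      have hv : PySem.Str.strip v ≠ "" := pvFirstTok_nonblank xs v xs2 h2
      rw [pvFoldTok rt xs v xs2 _ h2, pvScan, h]
      simp only [pvLoopA, if_pos hx, if_neg hrt, if_pos hv, Bool.false_eq_true, if_false]
      rw [h2]
      exact pvMainNS rt hrt xs2 (d.insert x ((PySem.Int.ofStr? v).getD 0))
termination_by l.length
decreasing_by
  exact Nat.lt_trans (pvFirstTok_lt xs v xs2 h2) (pvFirstTok_lt l x xs h)

-- Smoothie: the pending value is never touched; the fold is the scanner with sm = true
theorem pvMainSm (l : List String) (d : PySem.Dict String Int) (v : Option String) :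
    (l.foldl (pvLoopA (some "Smoothie")) (d, v)).1 = pvScan true d l := by
  match h : pvFirstTok l with
  | none =>
    rw [pvFoldSkip _ l _ h, pvScan, h]
  | some (x, xs) =>
    have hx : PySem.Str.strip x ≠ "" := pvFirstTok_nonblank l x xs h
    rw [pvFoldTok _ l x xs _ h, pvScan, h]
    simp only [pvLoopA, if_pos hx, if_true]
    exact pvMainSm xs (d.insert x 1) v
termination_by l.length
decreasing_by
  exact pvFirstTok_lt l x xs h

-- ===== VERDICT (by name: the statement is the Claim_ definition above) =====
theorem compile_counter_spec : Claim_equal_compile_counter := by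
  intro item_list recipe_type _ _
  unfold Spec_compile_counter compile_counter compile_counter_alt
  by_cases hrt : recipe_type = some "Smoothie"
  · subst hrt
    rw [pvMainSm]
    simp
  · rw [pvMainNS recipe_type hrt]
    simp [hrt]
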